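-- pv_equiv track=rewrite | github.com/unrulyabstractions/identifiability-toy-study | src/circuit/precompute.py | compute_node_mask_idx
-- ===== SOURCE A (Python) =====
-- from typing import List, Optional, Tuple
--
-- def compute_node_mask_idx(node_masks: List[List[int]], width: int, depth: int) -> int:
--     """Compute flat node_mask_idx from node masks.
--
--     The node_mask_idx uniquely identifies which hidden nodes are active.
--     Input and output layers are always fully active and not included.
--
--     Args:
--         node_masks: List of masks per layer [input, hidden1, ..., hiddenN, output]
--         width: Hidden layer width
--         depth: Number of hidden layers
--
--     Returns:
--         Flat node_mask_idx
--     """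
--     # Extract hidden layer masks (skip input and output)
--     hidden_masks = node_masks[1:-1] if len(node_masks) > 2 else []
--
--     # Convert each hidden layer mask to an integer (bitmask)
--     # Then combine into a single index
--     idx = 0
--     multiplier = 1
--     for layer_mask in hidden_masks:
--         # Convert layer mask to integer (e.g., [1, 0, 1] -> 5)
--         layer_int = sum(bit << i for i, bit in enumerate(layer_mask))
--         idx += layer_int * multiplier
--         multiplier *= (1 << width)  # 2^width possible masks per layer
--
--     return idx
-- ===== SOURCE B (Python) =====
-- from typing import List
--
-- def _layer_value(mask: List[int]) -> int:
--     # Horner's rule over the reversed bits: sum(bit << i) without enumerate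
--     v = 0
--     for bit in reversed(mask):
--         v = 2 * v + bit
--     return v
--
-- def compute_node_mask_idx(node_masks: List[List[int]], width: int, depth: int) -> int:
--     if len(node_masks) <= 2:
--         return 0
--     # Horner's method over the reversed hidden layers: radix 2**width per layer
--     idx = 0
--     for mask in reversed(node_masks[1:-1]):
--         idx = (idx << width) + _layer_value(mask)
--     return idx
-- ===== Notes on version B (the rewrite author's own statement) =====
-- stated objective: alternative
-- what changed: Replaces A's forward accumulator-plus-running-multiplier loop and enumerate-based per-layer bit sums by Horner's method at both levels: per-layer value via Horner over the reversed bits, and the flat index via Horner over the reversed hidden layers, eliminating the multiplier state and the enumerate index arithmetic.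
-- outside the precondition, e.g. on compute_node_mask_idx([[1], [1], [1]], -1, 1): A raises ValueError, B raises ValueError
import Mathlib
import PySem

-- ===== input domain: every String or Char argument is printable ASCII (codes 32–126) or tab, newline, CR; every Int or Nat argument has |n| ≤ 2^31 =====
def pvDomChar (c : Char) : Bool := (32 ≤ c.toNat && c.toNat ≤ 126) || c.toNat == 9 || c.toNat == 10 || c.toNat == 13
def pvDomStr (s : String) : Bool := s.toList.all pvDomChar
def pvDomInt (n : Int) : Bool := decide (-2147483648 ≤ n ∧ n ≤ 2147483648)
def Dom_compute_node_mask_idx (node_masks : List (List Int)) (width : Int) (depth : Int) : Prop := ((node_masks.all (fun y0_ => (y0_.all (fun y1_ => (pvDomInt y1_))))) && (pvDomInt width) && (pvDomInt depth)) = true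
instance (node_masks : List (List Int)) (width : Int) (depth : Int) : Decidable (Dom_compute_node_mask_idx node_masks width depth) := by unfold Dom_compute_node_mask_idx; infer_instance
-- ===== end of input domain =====

-- B replaces A's forward accumulator+multiplier loop and enumerate bit sums by Horner's
-- method at both levels (reversed layers, reversed bits): alternative decomposition, same cost.

-- ===== PORT A =====
-- layer_int = sum(bit << i for i, bit in enumerate(layer_mask))
def pvLayerInt (layer_mask : List Int) : Int :=
  (PySem.List.enumerate layer_mask).foldl (fun s p => s + p.2 * 2 ^ p.1.toNat) 0

def compute_node_mask_idx (node_masks : List (List Int)) (width : Int) (depth : Int) : Int :=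
  let hidden_masks :=
    if node_masks.length > 2 then PySem.List.slice node_masks (some 1) (some (-1)) else []
  -- loop state (idx, multiplier); 1 << width = 2^width (Python raises for width < 0: outside Pre_)
  (hidden_masks.foldl
    (fun st layer_mask => (st.1 + pvLayerInt layer_mask * st.2, st.2 * 2 ^ width.toNat))
    (0, 1)).1

-- ===== PORT B =====
-- Horner's rule over the reversed bits
def pvLayerValue (mask : List Int) : Int :=
  mask.reverse.foldl (fun v b => 2 * v + b) 0

def compute_node_mask_idx_alt (node_masks : List (List Int)) (width : Int) (depth : Int) : Int :=
  if node_masks.length ≤ 2 then 0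
  else
    -- Horner over the reversed hidden layers; idx << width = idx * 2^width
    -- (Python raises for width < 0: outside Pre_)
    (PySem.List.slice node_masks (some 1) (some (-1))).reverse.foldl
      (fun idx mask => idx * 2 ^ width.toNat + pvLayerValue mask) 0

-- ===== PRECONDITION & SPEC =====
-- Pre_ excludes only inputs where both Pythons RAISE ValueError: a shift by width < 0
-- is reached exactly when there is at least one hidden layer (len(node_masks) > 2).
def Pre_compute_node_mask_idx (node_masks : List (List Int)) (width : Int) (depth : Int) : Prop :=
  node_masks.length ≤ 2 ∨ 0 ≤ width
instance (node_masks : List (List Int)) (width : Int) (depth : Int) : Decidable (Pre_compute_node_mask_idx node_masks width depth) := by unfold Pre_compute_node_mask_idx; infer_instance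

def pvWitness_compute_node_mask_idx : List (List Int) × Int × Int := ([[1, 1], [1, 0], [0, 1], [1, 1]], 2, 2)

def Spec_compute_node_mask_idx (node_masks : List (List Int)) (width : Int) (depth : Int) (out : Int) : Prop := out = compute_node_mask_idx_alt node_masks width depth
instance (node_masks : List (List Int)) (width : Int) (depth : Int) (out : Int) : Decidable (Spec_compute_node_mask_idx node_masks width depth out) := by unfold Spec_compute_node_mask_idx; infer_instance

-- ===== CLAIM (what is proved, stated in full; the proofs are below) =====
def Claim_equal_compute_node_mask_idx : Prop := ∀ (node_masks : List (List Int)) (width : Int) (depth : Int), Dom_compute_node_mask_idx node_masks width depth → Pre_compute_node_mask_idx node_masks width depth → Spec_compute_node_mask_idx node_masks width depth (compute_node_mask_idx node_masks width depth)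

-- ===== LEMMAS AND PROOFS =====

-- proof-only helper: recursive mixed-radix combination
def pvCombine (layers : List (List Int)) (radix : Int) : Int :=
  match layers with
  | [] => 0
  | m :: rest => pvLayerValue m + radix * pvCombine rest radix

-- B's reversed-Horner fold computes pvCombine
theorem pv_revfold_eq (r : Int) (l : List (List Int)) :
    l.reverse.foldl (fun idx m => idx * r + pvLayerValue m) 0 = pvCombine l r := by
  induction l with
  | nil => rfl
  | cons x t ih =>
      simp only [List.reverse_cons, List.foldl_append, List.foldl_cons, List.foldl_nil,
        ih, pvCombine]
      ring

-- canonical little-endian value of a bit list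
def pvF : List Int → Int
  | [] => 0
  | b :: t => b + 2 * pvF t

theorem pvLayerValue_eq_pvF (l : List Int) : pvLayerValue l = pvF l := by
  induction l with
  | nil => rfl
  | cons b t ih =>
      simp only [pvLayerValue, List.reverse_cons, List.foldl_append, List.foldl_cons,
        List.foldl_nil] at *
      rw [ih]; simp [pvF]; ring

theorem pv_enum_sum (l : List Int) :
    ∀ (n : ℕ) (s : Int),
      (PySem.List.enumerate l (n : Int)).foldl (fun s p => s + p.2 * 2 ^ p.1.toNat) s
        = s + 2 ^ n * pvF l := by
  induction l with
  | nil => intro n s; simp [PySem.List.enumerate_nil, pvF]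
  | cons b t ih =>
      intro n s
      rw [PySem.List.enumerate_cons]
      have h1 : ((n : Int) + 1) = ((n + 1 : ℕ) : Int) := by push_cast; ring
      simp only [List.foldl_cons, h1, ih]
      simp [pvF, Int.toNat_natCast, pow_succ]
      ring

theorem pvLayerInt_eq (l : List Int) : pvLayerInt l = pvLayerValue l := by
  have := pv_enum_sum l 0 0
  simpa [pvLayerInt, pvLayerValue_eq_pvF] using this

-- invariant of A's (idx, multiplier) loop
theorem pv_loop_eq (r : Int) (l : List (List Int)) :
    ∀ (i m : Int),
      (l.foldl (fun st x => (st.1 + pvLayerInt x * st.2, st.2 * r)) (i, m)).1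
        = i + m * pvCombine l r := by
  induction l with
  | nil => intro i m; simp [pvCombine]
  | cons x t ih =>
      intro i m
      rw [List.foldl_cons, ih]
      simp only [pvCombine, pvLayerInt_eq]
      ring

-- ===== VERDICT (by name: the statement is the Claim_ definition above) =====
theorem compute_node_mask_idx_spec : Claim_equal_compute_node_mask_idx := by
  intro node_masks width depth _ _
  unfold Spec_compute_node_mask_idx compute_node_mask_idx compute_node_mask_idx_alt
  by_cases h : node_masks.length > 2
  · simp only [h, if_pos, if_neg (by omega : ¬ node_masks.length ≤ 2), pv_loop_eq,
      pv_revfold_eq]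
    ring
  · simp [h, (by omega : node_masks.length ≤ 2)]
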